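-- pv_equiv track=rewrite | github.com/Liamir/autodiff-control | src/rpa_control/controllers/basis.py | get_basis_size
-- ===== SOURCE A (Python) =====
-- def get_basis_size(n_vars: int, order: int = 2, include_constant: bool = True) -> int:
--     """Calculate the number of basis functions.
--
--     Formula: For n variables and order k, number of monomials is C(n+k, k)
--     Total = sum from degree 0 to order
--
--     Args:
--         n_vars: Number of state variables
--         order: Maximum polynomial order
--         include_constant: Whether constant term is included
--
--     Returns:
--         Number of basis functions
--     """
--     from math import comb
--
--     total = 0
--     if include_constant:
--         total += 1
--
--     for deg in range(1, order + 1):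
--         total += comb(n_vars + deg - 1, deg)
--
--     return total
-- ===== SOURCE B (Python) =====
-- def get_basis_size(n_vars: int, order: int = 2, include_constant: bool = True) -> int:
--     """Closed form via the hockey-stick identity instead of summing degree by degree."""
--     from math import comb
--     if order <= 0:
--         return 1 if include_constant else 0
--     return comb(n_vars + order, order) - (0 if include_constant else 1)
-- ===== Notes on version B (the rewrite author's own statement) =====
-- stated objective: faster
-- what changed: Replaces the degree-by-degree loop of comb calls with a single closed-form binomial coefficient via the hockey-stick identity sum_{d=0}^{k} C(n+d-1,d) = C(n+k,k).
import Mathlib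
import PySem

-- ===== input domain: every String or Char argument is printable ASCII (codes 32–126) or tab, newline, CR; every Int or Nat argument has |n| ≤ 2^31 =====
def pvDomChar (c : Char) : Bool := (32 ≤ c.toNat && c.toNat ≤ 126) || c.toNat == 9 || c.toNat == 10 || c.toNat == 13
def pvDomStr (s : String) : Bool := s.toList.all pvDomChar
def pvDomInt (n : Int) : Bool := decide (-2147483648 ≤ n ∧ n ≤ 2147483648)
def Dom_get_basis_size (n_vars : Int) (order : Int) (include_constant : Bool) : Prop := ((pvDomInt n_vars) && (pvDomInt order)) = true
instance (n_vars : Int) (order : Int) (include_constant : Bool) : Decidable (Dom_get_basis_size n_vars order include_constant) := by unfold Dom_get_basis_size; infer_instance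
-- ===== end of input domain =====

-- B replaces A's degree-by-degree summation of binomial coefficients with one
-- closed-form binomial coefficient (hockey-stick identity); objective: faster.

-- math.comb for nonnegative arguments (Pre_ keeps both arguments nonnegative
-- wherever either port evaluates it on admitted inputs); like CPython's math.comb
-- it uses the multiplicative formula over min(k, n-k) steps (exact at each step)
def pvCombNat (n k : Nat) : Nat :=
  if k ≤ n then
    (List.range (min k (n - k))).foldl (fun acc i => acc * (n - i) / (i + 1)) 1
  else 0

def pvComb (n k : Int) : Int := (pvCombNat n.toNat k.toNat : Int)

-- ===== PORT A =====
def get_basis_size (n_vars : Int) (order : Int) (include_constant : Bool) : Int :=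
  let total : Int := if include_constant then 1 else 0
  (PySem.List.pyRange 1 (order + 1) 1).foldl
    (fun total deg => total + pvComb (n_vars + deg - 1) deg) total

-- ===== PORT B =====
def get_basis_size_alt (n_vars : Int) (order : Int) (include_constant : Bool) : Int :=
  if order ≤ 0 then (if include_constant then 1 else 0)
  else pvComb (n_vars + order) order - (if include_constant then 0 else 1)

-- ===== PRECONDITION & SPEC =====
-- A raises ValueError (math.comb with a negative argument) when 0 < order and n_vars < 0;
-- exactly those inputs are excluded.
def Pre_get_basis_size (n_vars : Int) (order : Int) (include_constant : Bool) : Prop :=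
  0 < order → 0 ≤ n_vars
instance (n_vars : Int) (order : Int) (include_constant : Bool) : Decidable (Pre_get_basis_size n_vars order include_constant) := by unfold Pre_get_basis_size; infer_instance

def pvWitness_get_basis_size : Int × Int × Bool := (2, 3, true)

def Spec_get_basis_size (n_vars : Int) (order : Int) (include_constant : Bool) (out : Int) : Prop := out = get_basis_size_alt n_vars order include_constant
instance (n_vars : Int) (order : Int) (include_constant : Bool) (out : Int) : Decidable (Spec_get_basis_size n_vars order include_constant out) := by unfold Spec_get_basis_size; infer_instance

-- ===== CLAIM (what is proved, stated in full; the proofs are below) =====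
def Claim_equal_get_basis_size : Prop := ∀ (n_vars : Int) (order : Int) (include_constant : Bool), Dom_get_basis_size n_vars order include_constant → Pre_get_basis_size n_vars order include_constant → Spec_get_basis_size n_vars order include_constant (get_basis_size n_vars order include_constant)

-- ===== LEMMAS AND PROOFS =====

-- the multiplicative loop computes binomial coefficients
lemma pvCombFold (n j : Nat) (hj : j ≤ n) :
    (List.range j).foldl (fun acc i => acc * (n - i) / (i + 1)) 1 = n.choose j := by
  induction j with
  | zero => simp
  | succ j ih =>
    rw [List.range_succ, List.foldl_append, ih (by omega)]
    simp only [List.foldl_cons, List.foldl_nil]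
    have h := Nat.choose_succ_right_eq n j
    rw [← h, Nat.mul_div_cancel _ (by omega)]

lemma pvCombNat_eq_choose (n k : Nat) : pvCombNat n k = n.choose k := by
  unfold pvCombNat
  split_ifs with h
  · rcases Nat.lt_or_ge (n - k) k with hm | hm
    · rw [min_eq_right (by omega), pvCombFold n (n - k) (by omega), Nat.choose_symm h]
    · rw [min_eq_left (by omega), pvCombFold n k h]
  · exact (Nat.choose_eq_zero_of_lt (by omega)).symm

-- A's loop in closed form: for 0 ≤ n, summing C(n+deg-1, deg) for deg = 1..k
-- onto init gives init + C(n+k, k) - 1 (hockey-stick identity).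
lemma loopA_closed (n : Int) (hn : 0 ≤ n) (k : Nat) (init : Int) :
    (PySem.List.pyRange 1 ((k : Int) + 1) 1).foldl
      (fun total deg => total + pvComb (n + deg - 1) deg) init
    = init + ((n.toNat + k).choose k : Int) - 1 := by
  induction k generalizing init with
  | zero => rw [PySem.List.pyRange_one_eq_nil (by omega)]; simp
  | succ k ih =>
    have hsplit : PySem.List.pyRange 1 ((k + 1 : Nat) : Int) 1 ++ [((k : Int) + 1)]
        = PySem.List.pyRange 1 (((k + 1 : Nat) : Int) + 1) 1 := by
      push_cast
      exact (PySem.List.pyRange_one_succ_right (by omega)).symm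
    rw [← hsplit, List.foldl_append]
    have hcast : ((k + 1 : Nat) : Int) = (k : Int) + 1 := by push_cast; ring
    rw [hcast] at *
    rw [ih]
    have h1 : (n + ((k : Int) + 1) - 1).toNat = n.toNat + k := by omega
    have h2 : ((k : Int) + 1).toNat = k + 1 := by omega
    simp only [List.foldl_cons, List.foldl_nil, pvComb, pvCombNat_eq_choose, h1, h2]
    have hcs : (n.toNat + (k + 1)).choose (k + 1)
        = (n.toNat + k).choose k + (n.toNat + k).choose (k + 1) := by
      have := Nat.choose_succ_succ (n.toNat + k) k
      omega
    push_cast [hcs]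
    ring

-- ===== VERDICT (by name: the statement is the Claim_ definition above) =====
theorem get_basis_size_spec : Claim_equal_get_basis_size := by
  intro n_vars order include_constant _ hpre
  unfold Spec_get_basis_size get_basis_size get_basis_size_alt
  by_cases hord : order ≤ 0
  · rw [PySem.List.pyRange_one_eq_nil (by omega)]
    simp [hord]
  · have hn : 0 ≤ n_vars := hpre (by omega)
    have hk : order = ((order.toNat : Nat) : Int) := by omega
    rw [if_neg hord, hk, loopA_closed n_vars hn order.toNat]
    have h3 : (n_vars + ((order.toNat : Nat) : Int)).toNat = n_vars.toNat + order.toNat := by omega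
    have h4 : (((order.toNat : Nat) : Int)).toNat = order.toNat := by omega
    simp only [pvComb, pvCombNat_eq_choose, h3, h4]
    cases include_constant <;> simp
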